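-- pv_equiv track=rewrite | github.com/bioinformatics-cdac/ICE_SC25 | scripts/comparison.py | saturation_curve
-- ===== SOURCE A (Python) =====
-- def saturation_curve(labels):
--     discovered = set()
--     saturation = []
--     for i, label in enumerate(labels):
--         if label != -1:
--             discovered.add(label)
--         saturation.append(len(discovered))
--     return saturation
-- ===== SOURCE B (Python) =====
-- def saturation_curve(labels):
--     labels = list(labels)
--     # pass 1: novelty flags (1 = first occurrence of a non-(-1) label)
--     seen = set()
--     flags = []
--     for label in labels:
--         if label != -1 and label not in seen:
--             seen.add(label)
--             flags.append(1)
--         else: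
--             flags.append(0)
--     # pass 2: running prefix sum of the flags
--     out = []
--     total = 0
--     for f in flags:
--         total += f
--         out.append(total)
--     return out
-- ===== Notes on version B (the rewrite author's own statement) =====
-- stated objective: alternative
-- what changed: B replaces A's per-step len(set) queries by a two-pass decomposition: one pass emits 0/1 novelty flags via a seen-set, a second pass returns their running prefix sums.
import Mathlib
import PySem

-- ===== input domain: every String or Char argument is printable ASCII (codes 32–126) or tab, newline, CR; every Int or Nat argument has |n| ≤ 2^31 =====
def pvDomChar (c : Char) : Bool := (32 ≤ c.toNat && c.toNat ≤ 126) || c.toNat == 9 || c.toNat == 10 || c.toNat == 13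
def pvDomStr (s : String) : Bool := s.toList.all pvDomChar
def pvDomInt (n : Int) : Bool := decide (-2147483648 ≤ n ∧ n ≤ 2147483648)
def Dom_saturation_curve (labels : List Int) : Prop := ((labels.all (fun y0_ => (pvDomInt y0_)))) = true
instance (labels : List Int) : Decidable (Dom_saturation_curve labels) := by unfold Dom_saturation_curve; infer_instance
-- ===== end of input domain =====

-- ===== PORT A =====
-- B changes only the decomposition (novelty flags + prefix sums vs per-step set size); same O(n) cost.
def satA_go (d : PySem.Set Int) : List Int → List Int
  | [] => []
  | l :: rest =>
    let d' := if l ≠ -1 then PySem.Set.add d l else d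
    PySem.Set.len d' :: satA_go d' rest

def saturation_curve (labels : List Int) : List Int :=
  satA_go PySem.Set.empty labels

-- ===== PORT B =====
def satB_flags (seen : PySem.Set Int) : List Int → List Int
  | [] => []
  | l :: rest =>
    if l ≠ -1 ∧ ¬ (PySem.Set.contains seen l) then
      1 :: satB_flags (PySem.Set.add seen l) rest
    else
      0 :: satB_flags seen rest

def satB_cum (total : Int) : List Int → List Int
  | [] => []
  | f :: rest => (total + f) :: satB_cum (total + f) rest

def saturation_curve_alt (labels : List Int) : List Int :=
  satB_cum 0 (satB_flags PySem.Set.empty labels)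

-- ===== PRECONDITION & SPEC =====
def Spec_saturation_curve (labels : List Int) (out : List Int) : Prop := out = saturation_curve_alt labels
instance (labels : List Int) (out : List Int) : Decidable (Spec_saturation_curve labels out) := by unfold Spec_saturation_curve; infer_instance

-- ===== CLAIM (what is proved, stated in full; the proofs are below) =====
def Claim_equal_saturation_curve : Prop := ∀ (labels : List Int), Dom_saturation_curve labels → Spec_saturation_curve labels (saturation_curve labels)

-- ===== LEMMAS AND PROOFS =====

-- ===== VERDICT (by name: the statement is the Claim_ definition above) =====
theorem sat_go_eq (ls : List Int) : ∀ (d : PySem.Set Int),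
    satA_go d ls = satB_cum (PySem.Set.len d) (satB_flags d ls) := by
  induction ls with
  | nil => intro d; rfl
  | cons l rest ih =>
    intro d
    by_cases hm : l ∈ d
    · have hc : PySem.Set.contains d l = true := by
        simp [PySem.Set.contains, hm]
      have hadd : PySem.Set.add d l = d := by
        simp [PySem.Set.add, hc]; exact hm
      by_cases h1 : l = -1
      · simp [satA_go, satB_flags, satB_cum, h1, hm, ih]
      · simp [satA_go, satB_flags, satB_cum, h1, hm, hadd, ih]
    · have hc : ¬ PySem.Set.contains d l = true := by
        simp [PySem.Set.contains, hm]
      by_cases h1 : l = -1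
      · simp [satA_go, satB_flags, satB_cum, h1, hm, ih]
      · have hadd : PySem.Set.add d l = d ++ [l] := by
          simp [PySem.Set.add, hc]; exact hm
        have hlen : PySem.Set.len (d ++ [l]) = PySem.Set.len d + 1 := by
          simp [PySem.Set.len]
        simp [satA_go, satB_flags, satB_cum, h1, hm, hadd, hlen, ih]

theorem saturation_curve_spec : Claim_equal_saturation_curve := by
  intro labels _
  unfold Spec_saturation_curve saturation_curve saturation_curve_alt
  have := sat_go_eq labels PySem.Set.empty
  simpa [PySem.Set.len, PySem.Set.empty] using this
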